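-- pv_equiv track=rewrite | github.com/ClarkDinh/pypm | pypatternminer/huim_abc.py | delete0
-- ===== SOURCE A (Python) =====
-- from typing import List, Optional, Set
--
-- def delete0(values: List[int]) -> Optional[List[int]]:
--     if len(values) > 0 and values.count(1) > 0:
--         i = len(values) - 1
--         while i >= 0 and values[i] == 0:
--             i -= 1
--         templist: List[int] = []
--         j = 0
--         while j <= i:
--             templist.append(int(values[j]))
--             j += 1
--         return templist
--     return None
-- ===== SOURCE B (Python) =====
-- from typing import List, Optional
--
-- def delete0(values: List[int]) -> Optional[List[int]]:
--     if len(values) > 0 and 1 in values: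
--         result: List[int] = []
--         pending = 0
--         for v in values:
--             if v == 0:
--                 pending += 1
--             else:
--                 result.extend([0] * pending)
--                 pending = 0
--                 result.append(int(v))
--         return result
--     return None
-- ===== Notes on version B (the rewrite author's own statement) =====
-- stated objective: alternative
-- what changed: Instead of scanning backward for the last non-zero index and then copying the prefix, B makes one forward pass with a pending-zero counter: zeros are buffered as a count and flushed only when a later non-zero element appears, so trailing zeros are never emitted.
import Mathlib
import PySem

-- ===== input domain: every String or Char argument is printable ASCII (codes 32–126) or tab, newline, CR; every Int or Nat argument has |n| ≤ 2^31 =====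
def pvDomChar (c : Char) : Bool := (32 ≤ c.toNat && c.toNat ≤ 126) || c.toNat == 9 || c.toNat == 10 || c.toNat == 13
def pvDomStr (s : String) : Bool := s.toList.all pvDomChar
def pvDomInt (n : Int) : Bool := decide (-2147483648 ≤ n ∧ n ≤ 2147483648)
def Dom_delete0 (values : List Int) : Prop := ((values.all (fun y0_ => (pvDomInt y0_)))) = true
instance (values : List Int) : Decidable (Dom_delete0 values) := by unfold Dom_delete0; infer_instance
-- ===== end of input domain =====

-- B replaces A's backward scan for the last non-zero index (plus prefix copy) by one
-- forward pass that buffers runs of zeros as a pending counter and flushes them only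
-- when a later non-zero element appears (objective: alternative, same cost).

-- ===== PORT A =====
-- 'while i >= 0 and values[i] == 0: i -= 1' — n plays the role of i+1, so the loop returns i+1
def delete0_loop1 (values : List Int) : Nat → Nat
  | 0 => 0
  | n + 1 => if values.getD n 0 == 0 then delete0_loop1 values n else n + 1

-- 'while j <= i: templist.append(int(values[j])); j += 1' — builds the prefix j = 0 .. i (k = i+1)
def delete0_loop2 (values : List Int) (j k : Nat) : List Int :=
  if j < k then values.getD j 0 :: delete0_loop2 values (j + 1) k else []
termination_by k - j

def delete0 (values : List Int) : Option (List Int) :=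
  if values.length > 0 ∧ values.count 1 > 0 then
    some (delete0_loop2 values 0 (delete0_loop1 values values.length))
  else none

-- ===== PORT B =====
-- one forward pass; state = (result so far, number of pending zeros not yet emitted)
def delete0_step (s : List Int × Nat) (v : Int) : List Int × Nat :=
  if v == 0 then (s.1, s.2 + 1) else (s.1 ++ List.replicate s.2 0 ++ [v], 0)

def delete0_alt (values : List Int) : Option (List Int) :=
  if values.length > 0 ∧ 1 ∈ values then
    some ((values.foldl delete0_step (([] : List Int), (0 : Nat))).1)
  else none

-- ===== PRECONDITION & SPEC =====
def Spec_delete0 (values : List Int) (out : Option (List Int)) : Prop := out = delete0_alt values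
instance (values : List Int) (out : Option (List Int)) : Decidable (Spec_delete0 values out) := by unfold Spec_delete0; infer_instance

-- ===== CLAIM (what is proved, stated in full; the proofs are below) =====
def Claim_equal_delete0 : Prop := ∀ (values : List Int), Dom_delete0 values → Spec_delete0 values (delete0 values)

-- ===== LEMMAS AND PROOFS =====

-- the common characterisation: the list with its trailing zeros removed
def trimR (xs : List Int) : List Int := (xs.reverse.dropWhile (fun x => x == 0)).reverse

theorem trimR_cons_zero (ys : List Int) :
    trimR (0 :: ys) = if trimR ys = [] then [] else (0 : Int) :: trimR ys := by
  unfold trimR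
  rw [List.reverse_cons, List.dropWhile_append]
  split
  · next h =>
    rw [if_pos]
    · simp
    · simp only [List.isEmpty_iff] at h
      simp [h]
  · next h =>
    rw [if_neg]
    · simp
    · simp only [List.isEmpty_iff] at h
      simp [h]

theorem trimR_cons_ne (v : Int) (hv : ¬ v = 0) (ys : List Int) :
    trimR (v :: ys) = v :: trimR ys := by
  unfold trimR
  rw [List.reverse_cons, List.dropWhile_append]
  split
  · next h =>
    simp only [List.isEmpty_iff] at h
    simp [h, hv]
  · simp

theorem trimR_eq_nil_iff (xs : List Int) : trimR xs = [] ↔ ∀ x ∈ xs, x = 0 := by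
  unfold trimR
  rw [List.reverse_eq_nil_iff, List.dropWhile_eq_nil_iff]
  constructor
  · intro h x hx
    have := h x (List.mem_reverse.mpr hx)
    simpa using this
  · intro h x hx
    simp [h x (List.mem_reverse.mp hx)]

-- B's loop invariant
theorem fold_trim (xs : List Int) (acc : List Int) (p : Nat) :
    (xs.foldl delete0_step (acc, p)).1
      = if trimR xs = [] then acc else acc ++ List.replicate p 0 ++ trimR xs := by
  induction xs generalizing acc p with
  | nil => simp [trimR]
  | cons v ys ih =>
    rw [List.foldl_cons]
    by_cases hv : v = 0
    · subst hv
      simp only [delete0_step, beq_self_eq_true, if_pos]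
      rw [ih, trimR_cons_zero]
      by_cases hy : trimR ys = []
      · simp [hy]
      · rw [if_neg hy, if_neg hy, if_neg (by simp : ¬ ((0 : Int) :: trimR ys = []))]
        rw [List.replicate_succ']; simp
    · have hb : (v == 0) = false := by simpa using hv
      simp only [delete0_step, hb, Bool.false_eq_true, if_false]
      rw [ih, trimR_cons_ne v hv]
      rw [if_neg (by simp : ¬ (v :: trimR ys = []))]
      by_cases hy : trimR ys = []
      · simp [hy]
      · rw [if_neg hy]; simp

-- A-side lemmas
theorem delete0_loop2_eq (values : List Int) (j k : Nat) (hk : k ≤ values.length) :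
    delete0_loop2 values j k = (values.drop j).take (k - j) := by
  by_cases h : j < k
  · rw [delete0_loop2, if_pos h]
    rw [delete0_loop2_eq values (j + 1) k hk]
    have hj : j < values.length := lt_of_lt_of_le h hk
    have : values.drop j = values[j] :: values.drop (j + 1) := (List.drop_eq_getElem_cons hj)
    rw [this]
    have hkj : k - j = (k - (j + 1)) + 1 := by omega
    rw [hkj, List.take_succ_cons, List.getD_eq_getElem values 0 hj]
  · rw [delete0_loop2, if_neg h]
    have : k - j = 0 := by omega
    rw [this, List.take_zero]
termination_by k - j

theorem delete0_loop1_le (values : List Int) (n : Nat) : delete0_loop1 values n ≤ n := by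
  induction n with
  | zero => simp [delete0_loop1]
  | succ n ih =>
    rw [delete0_loop1]
    split
    · omega
    · omega

theorem delete0_loop1_take (values : List Int) (n : Nat) (hn : n ≤ values.length) :
    values.take (delete0_loop1 values n) = trimR (values.take n) := by
  induction n with
  | zero => simp [delete0_loop1, trimR]
  | succ n ih =>
    have hn' : n ≤ values.length := by omega
    have hlt : n < values.length := by omega
    have htake : values.take (n + 1) = values.take n ++ [values[n]] := by
      rw [List.take_add_one, List.getElem?_eq_getElem hlt]; rfl
    unfold trimR
    rw [delete0_loop1, htake, List.reverse_append, List.reverse_singleton, List.singleton_append,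
        List.dropWhile_cons]
    have hg : values.getD n 0 = values[n] := List.getD_eq_getElem values 0 hlt
    split
    · next h =>
      have : (values[n] == 0) = true := by rw [← hg]; exact h
      rw [this]
      have := ih hn'
      unfold trimR at this
      simpa using this
    · next h =>
      have : (values[n] == 0) = false := by
        rw [← hg]; exact Bool.eq_false_iff.mpr (by simpa using h)
      rw [this]
      simp [← htake]

-- ===== VERDICT (by name: the statement is the Claim_ definition above) =====
theorem delete0_spec : Claim_equal_delete0 := by
  intro values _
  unfold Spec_delete0 delete0 delete0_alt
  have hmem : (values.length > 0 ∧ values.count 1 > 0) ↔ (values.length > 0 ∧ 1 ∈ values) := by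
    constructor
    · rintro ⟨h1, h2⟩; exact ⟨h1, List.count_pos_iff.mp h2⟩
    · rintro ⟨h1, h2⟩; exact ⟨h1, List.count_pos_iff.mpr h2⟩
  by_cases h : values.length > 0 ∧ 1 ∈ values
  · rw [if_pos (hmem.mpr h), if_pos h]
    -- A's side computes trimR values
    have h1 := delete0_loop1_le values values.length
    rw [delete0_loop2_eq values 0 _ h1, Nat.sub_zero, List.drop_zero]
    have hA := delete0_loop1_take values values.length (le_refl _)
    rw [List.take_length] at hA
    -- B's side computes trimR values too, since values contains a 1
    have hnil : ¬ trimR values = [] := by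
      rw [trimR_eq_nil_iff]
      intro hall
      have := hall 1 h.2
      norm_num at this
    rw [fold_trim values [] 0, if_neg hnil, hA]
    simp
  · rw [if_neg (fun hc => h (hmem.mp hc)), if_neg h]
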